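-- pv_equiv track=rewrite | github.com/Evgya/Python | Yandex_training_1.0/6/F. Very easy task/Very_easy_task.py | get_min_time_to_xerox
-- ===== SOURCE A (Python) =====
-- def get_min_time_to_xerox(N, x, y):
--     _min = min(x, y)
--     left_border = 0
--     right_border = _min*N
--     while left_border < right_border:
--         middle = (left_border + right_border)//2
--         if middle//x + middle//y >= N - 1:
--             right_border = middle
--         else:
--             left_border = middle + 1
--     return left_border + _min
-- ===== SOURCE B (Python) =====
-- def get_min_time_to_xerox(N, x, y):
--     m = min(x, y)
--     k = N - 1
--     if k <= 0:
--         return m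
--     # (N-1)-th completion time of two machines with periods x and y:
--     # split the k jobs as i on the x-machine and k-i on the y-machine at the
--     # crossing point i = ceil(k*y/(x+y)); the answer is the better of i and i-1.
--     i = -(-k * y // (x + y))
--     return min(max(i * x, (k - i) * y), max((i - 1) * x, (k - i + 1) * y)) + m
-- ===== Notes on version B (the rewrite author's own statement) =====
-- stated objective: alternative
-- what changed: A binary-searches the completion time with an O(log) loop; B computes the (N-1)-th completion time in closed form by splitting the N-1 jobs between the two machines at the crossing point i = ceil((N-1)*y/(x+y)) and taking the better of splits i and i-1, with no loop at all.
-- outside the precondition, e.g. on get_min_time_to_xerox(2, -3, 5): A returns -3, B returns -12; on get_min_time_to_xerox(3, 0, 0): A returns 0, B raises ZeroDivisionError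
import Mathlib
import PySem

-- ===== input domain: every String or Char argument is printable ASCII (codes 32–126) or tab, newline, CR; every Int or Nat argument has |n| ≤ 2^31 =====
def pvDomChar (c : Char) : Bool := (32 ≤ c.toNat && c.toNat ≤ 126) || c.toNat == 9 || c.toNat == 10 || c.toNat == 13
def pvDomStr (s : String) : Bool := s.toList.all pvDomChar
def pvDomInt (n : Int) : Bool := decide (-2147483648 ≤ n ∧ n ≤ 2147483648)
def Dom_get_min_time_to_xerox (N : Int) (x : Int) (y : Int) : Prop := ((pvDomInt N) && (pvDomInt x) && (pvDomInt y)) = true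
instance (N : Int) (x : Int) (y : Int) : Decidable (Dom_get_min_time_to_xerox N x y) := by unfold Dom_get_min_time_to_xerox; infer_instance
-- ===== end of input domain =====

-- B replaces A's binary search over time by a closed-form O(1) split of the N-1 jobs
-- between the two machines at the crossing point i = ceil((N-1)*y/(x+y)).

-- ===== PORT A =====
-- A's while-loop: binary search on [left_border, right_border)
def pvBsLoop (N : Int) (x : Int) (y : Int) (l : Int) (r : Int) : Int :=
  if h : l < r then
    let middle := PySem.Int.floordiv (l + r) 2
    if PySem.Int.floordiv middle x + PySem.Int.floordiv middle y ≥ N - 1 then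
      pvBsLoop N x y l middle
    else
      pvBsLoop N x y (middle + 1) r
  else l
termination_by (r - l).toNat
decreasing_by
  · have h1 : l ≤ PySem.Int.floordiv (l + r) 2 :=
      (PySem.Int.le_floordiv_iff_mul_le (by omega : (0:Int) < 2)).2 (by omega)
    have h2 : PySem.Int.floordiv (l + r) 2 < r :=
      (PySem.Int.floordiv_lt_iff_lt_mul (by omega : (0:Int) < 2)).2 (by omega)
    omega
  · have h1 : l ≤ PySem.Int.floordiv (l + r) 2 :=
      (PySem.Int.le_floordiv_iff_mul_le (by omega : (0:Int) < 2)).2 (by omega)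
    have h2 : PySem.Int.floordiv (l + r) 2 < r :=
      (PySem.Int.floordiv_lt_iff_lt_mul (by omega : (0:Int) < 2)).2 (by omega)
    omega

def get_min_time_to_xerox (N : Int) (x : Int) (y : Int) : Int :=
  let _min := min x y
  let left_border : Int := 0
  let right_border := _min * N
  pvBsLoop N x y left_border right_border + _min

-- ===== PORT B =====
def get_min_time_to_xerox_alt (N : Int) (x : Int) (y : Int) : Int :=
  let m := min x y
  let k := N - 1
  if k ≤ 0 then m
  else
    -- i = ceil(k*y/(x+y)) as Python's -(-k*y // (x+y))
    let i := -(PySem.Int.floordiv (-(k * y)) (x + y))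
    min (max (i * x) ((k - i) * y)) (max ((i - 1) * x) ((k - i + 1) * y)) + m

-- ===== PRECONDITION & SPEC =====
-- Pre_ excludes negative periods/copy-counts outside the problem's natural domain, where A's
-- binary search runs on a non-monotone predicate and returns accidental values (or divides by
-- zero), and the degenerate input x = y = 0 with N ≥ 2, where A accidentally returns 0 while
-- B's closed form divides by zero.
def Pre_get_min_time_to_xerox (N : Int) (x : Int) (y : Int) : Prop :=
  ((0 ≤ x ∧ 0 ≤ y) ∨ (0 ≤ N ∧ N ≤ 1)) ∧ ¬(x = 0 ∧ y = 0 ∧ 2 ≤ N)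
instance (N : Int) (x : Int) (y : Int) : Decidable (Pre_get_min_time_to_xerox N x y) := by unfold Pre_get_min_time_to_xerox; infer_instance

def pvWitness_get_min_time_to_xerox : Int × Int × Int := (5, 3, 4)

def Spec_get_min_time_to_xerox (N : Int) (x : Int) (y : Int) (out : Int) : Prop := out = get_min_time_to_xerox_alt N x y
instance (N : Int) (x : Int) (y : Int) (out : Int) : Decidable (Spec_get_min_time_to_xerox N x y out) := by unfold Spec_get_min_time_to_xerox; infer_instance

-- ===== CLAIM (what is proved, stated in full; the proofs are below) =====
def Claim_equal_get_min_time_to_xerox : Prop := ∀ (N : Int) (x : Int) (y : Int), Dom_get_min_time_to_xerox N x y → Pre_get_min_time_to_xerox N x y → Spec_get_min_time_to_xerox N x y (get_min_time_to_xerox N x y)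


-- ===== LEMMAS AND PROOFS =====

-- number of copies finished by time t (t//x + t//y)
def pvCnt (x : Int) (y : Int) (t : Int) : Int :=
  PySem.Int.floordiv t x + PySem.Int.floordiv t y

theorem pvFdiv_mono {x t m : Int} (hx : 0 < x) (h : t ≤ m) :
    PySem.Int.floordiv t x ≤ PySem.Int.floordiv m x :=
  (PySem.Int.le_floordiv_iff_mul_le hx).2
    (le_trans ((PySem.Int.le_floordiv_iff_mul_le hx).1 le_rfl) h)

theorem pvCnt_mono {x y t m : Int} (hx : 0 < x) (hy : 0 < y) (h : t ≤ m) :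
    pvCnt x y t ≤ pvCnt x y m :=
  add_le_add (pvFdiv_mono hx h) (pvFdiv_mono hy h)

theorem pvCnt_neg {x y t K : Int} (hx : 0 < x) (hy : 0 < y) (ht : t < 0) (hK : 0 ≤ K) :
    pvCnt x y t < K := by
  have h1 : PySem.Int.floordiv t x < 0 :=
    (PySem.Int.floordiv_lt_iff_lt_mul hx).2 (by omega)
  have h2 : PySem.Int.floordiv t y < 0 :=
    (PySem.Int.floordiv_lt_iff_lt_mul hy).2 (by omega)
  unfold pvCnt; omega

-- the binary search returns the least t with pvCnt x y t ≥ N - 1 (within [l, r])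
theorem pvBsLoop_spec (N x y : Int) (hx : 0 < x) (hy : 0 < y) :
    ∀ (n : Nat) (l r : Int), (r - l).toNat = n → l ≤ r →
    (∀ t, t < l → pvCnt x y t < N - 1) → N - 1 ≤ pvCnt x y r →
    l ≤ pvBsLoop N x y l r ∧ pvBsLoop N x y l r ≤ r ∧
      N - 1 ≤ pvCnt x y (pvBsLoop N x y l r) ∧
      ∀ t, t < pvBsLoop N x y l r → pvCnt x y t < N - 1 := by
  intro n
  induction n using Nat.strong_induction_on with
  | _ n ih =>
    intro l r hn hlr hlow hr
    rw [pvBsLoop]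
    by_cases h : l < r
    · rw [dif_pos h]
      have hm1 : l ≤ PySem.Int.floordiv (l + r) 2 :=
        (PySem.Int.le_floordiv_iff_mul_le (by omega : (0:Int) < 2)).2 (by omega)
      have hm2 : PySem.Int.floordiv (l + r) 2 < r :=
        (PySem.Int.floordiv_lt_iff_lt_mul (by omega : (0:Int) < 2)).2 (by omega)
      set m := PySem.Int.floordiv (l + r) 2 with hm
      by_cases hp : PySem.Int.floordiv m x + PySem.Int.floordiv m y ≥ N - 1
      · rw [if_pos hp]
        have hrec := ih (m - l).toNat (by omega) l m rfl (by omega) hlow hp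
        exact ⟨hrec.1, by omega, hrec.2.2⟩
      · rw [if_neg hp]
        have hlow' : ∀ t, t < m + 1 → pvCnt x y t < N - 1 := by
          intro t ht
          by_cases htl : t < l
          · exact hlow t htl
          · have : pvCnt x y t ≤ pvCnt x y m := pvCnt_mono hx hy (by omega)
            have : pvCnt x y m < N - 1 := by unfold pvCnt; omega
            have := pvCnt_mono hx hy (show t ≤ m by omega) (x := x) (y := y)
            unfold pvCnt at *; omega
        have hrec := ih (r - (m + 1)).toNat (by omega) (m + 1) r rfl (by omega) hlow' hr
        exact ⟨by omega, hrec.2.1, hrec.2.2⟩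
    · rw [dif_neg h]
      have : l = r := by omega
      subst this
      exact ⟨le_rfl, le_rfl, hr, hlow⟩

-- characterisation of B's closed-form answer when x, y ≥ 1 and k = N - 1 ≥ 1
theorem pvAlt_char (x y k i T : Int) (hx : 0 < x) (hy : 0 < y)
    (hi : i = -(PySem.Int.floordiv (-(k * y)) (x + y)))
    (hT : T = min (max (i * x) ((k - i) * y)) (max ((i - 1) * x) ((k - i + 1) * y))) :
    k ≤ pvCnt x y T ∧ ∀ t, t < T → pvCnt x y t < k := by
  have hxy : (0:Int) < x + y := by omega
  have hib : (i - 1) * (x + y) < k * y ∧ k * y ≤ i * (x + y) :=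
    (PySem.Int.neg_floordiv_neg_eq_iff_of_pos hxy).1 hi.symm
  have h1 : (k - i) * y ≤ i * x := by nlinarith [hib.2]
  have h2 : (i - 1) * x < (k - i + 1) * y := by nlinarith [hib.1]
  have hT' : T = min (i * x) ((k - i + 1) * y) := by
    rw [hT, max_eq_left h1, max_eq_right (le_of_lt h2)]
  have hTix : T ≤ i * x := by rw [hT']; exact min_le_left _ _
  have hTy : T ≤ (k - i + 1) * y := by rw [hT']; exact min_le_right _ _
  constructor
  · rcases min_cases (i * x) ((k - i + 1) * y) with ⟨hv, _⟩ | ⟨hv, _⟩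
    · -- T = i*x
      have hfx : i ≤ PySem.Int.floordiv T x :=
        (PySem.Int.le_floordiv_iff_mul_le hx).2 (by rw [hT', hv])
      have hfy : k - i ≤ PySem.Int.floordiv T y :=
        (PySem.Int.le_floordiv_iff_mul_le hy).2 (by rw [hT', hv]; exact h1)
      unfold pvCnt; omega
    · -- T = (k-i+1)*y
      have hfy : k - i + 1 ≤ PySem.Int.floordiv T y :=
        (PySem.Int.le_floordiv_iff_mul_le hy).2 (by rw [hT', hv])
      have hfx : i - 1 ≤ PySem.Int.floordiv T x :=
        (PySem.Int.le_floordiv_iff_mul_le hx).2 (by rw [hT', hv]; exact le_of_lt h2)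
      unfold pvCnt; omega
  · intro t ht
    have h3 : PySem.Int.floordiv t x < i :=
      (PySem.Int.floordiv_lt_iff_lt_mul hx).2 (by omega)
    have h4 : PySem.Int.floordiv t y < k - i + 1 :=
      (PySem.Int.floordiv_lt_iff_lt_mul hy).2 (by omega)
    unfold pvCnt; omega

-- two values with the same "least t with cnt t ≥ K" characterisation are equal
theorem pvUnique (x y K L T : Int)
    (hL1 : K ≤ pvCnt x y L) (hL2 : ∀ t, t < L → pvCnt x y t < K)
    (hT1 : K ≤ pvCnt x y T) (hT2 : ∀ t, t < T → pvCnt x y t < K) : L = T := by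
  rcases lt_trichotomy L T with h | h | h
  · exact absurd hL1 (by have := hT2 L h; omega)
  · exact h
  · exact absurd hT1 (by have := hL2 T h; omega)

-- A's loop never runs when the right border is not positive
theorem pvBsLoop_base (N x y l r : Int) (h : ¬ l < r) : pvBsLoop N x y l r = l := by
  rw [pvBsLoop, dif_neg h]

theorem pvFdiv_zero {x : Int} (hx : 0 < x) : PySem.Int.floordiv 0 x = 0 :=
  (PySem.Int.floordiv_eq_iff_of_pos hx).2 (by constructor <;> omega)

-- in the positive case A's binary search satisfies the least-t characterisation
theorem pvBs_char (N x y : Int) (hx : 0 < x) (hy : 0 < y) (hN : 1 ≤ N) :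
    0 ≤ pvBsLoop N x y 0 (min x y * N) ∧
      N - 1 ≤ pvCnt x y (pvBsLoop N x y 0 (min x y * N)) ∧
      ∀ t, t < pvBsLoop N x y 0 (min x y * N) → pvCnt x y t < N - 1 := by
  have hmin : 0 ≤ min x y := le_min (by omega) (by omega)
  have hr0 : (0:Int) ≤ min x y * N := mul_nonneg hmin (by omega)
  have hlow : ∀ t, t < (0:Int) → pvCnt x y t < N - 1 :=
    fun t ht => pvCnt_neg hx hy ht (by omega)
  have hrcnt : N - 1 ≤ pvCnt x y (min x y * N) := by
    rcases le_total x y with h | h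
    · rw [min_eq_left h]
      have hfx : N ≤ PySem.Int.floordiv (x * N) x :=
        (PySem.Int.le_floordiv_iff_mul_le hx).2 (by ring_nf; omega)
      have hfy : (0:Int) ≤ PySem.Int.floordiv (x * N) y :=
        (PySem.Int.le_floordiv_iff_mul_le hy).2 (by nlinarith)
      unfold pvCnt; omega
    · rw [min_eq_right h]
      have hfy : N ≤ PySem.Int.floordiv (y * N) y :=
        (PySem.Int.le_floordiv_iff_mul_le hy).2 (by ring_nf; omega)
      have hfx : (0:Int) ≤ PySem.Int.floordiv (y * N) x :=
        (PySem.Int.le_floordiv_iff_mul_le hx).2 (by nlinarith)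
      unfold pvCnt; omega
  have hbs := pvBsLoop_spec N x y hx hy (min x y * N - 0).toNat 0 (min x y * N) rfl hr0 hlow hrcnt
  exact ⟨hbs.1, hbs.2.2⟩

-- ===== VERDICT (by name: the statement is the Claim_ definition above) =====
theorem get_min_time_to_xerox_spec : Claim_equal_get_min_time_to_xerox := by
  unfold Claim_equal_get_min_time_to_xerox
  intro N x y _ hpre
  unfold Spec_get_min_time_to_xerox
  unfold Pre_get_min_time_to_xerox at hpre
  simp only [get_min_time_to_xerox, get_min_time_to_xerox_alt]
  by_cases hN : 1 ≤ N
  · by_cases hx : 0 < x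
    · by_cases hy : 0 < y
      · -- main case: x ≥ 1, y ≥ 1, N ≥ 1
        have hbs := pvBs_char N x y hx hy hN
        by_cases h1 : N - 1 ≤ 0
        · -- N = 1: the least t with cnt t ≥ 0 is 0
          rw [if_pos h1]
          have h0 : N - 1 ≤ pvCnt x y 0 := by
            have := pvFdiv_zero hx; have := pvFdiv_zero hy; unfold pvCnt; omega
          have hL0 : pvBsLoop N x y 0 (min x y * N) = 0 :=
            pvUnique x y (N - 1) _ 0 hbs.2.1 hbs.2.2 h0
              (fun t ht => pvCnt_neg hx hy ht (by omega))
          omega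
        · rw [if_neg h1]
          have hchar := pvAlt_char x y (N - 1)
            (-(PySem.Int.floordiv (-((N - 1) * y)) (x + y))) _
            hx hy rfl rfl
          have hLT := pvUnique x y (N - 1) _ _ hbs.2.1 hbs.2.2 hchar.1 hchar.2
          omega
      · -- y ≤ 0
        have hmin : min x y = y := min_eq_right (by omega)
        by_cases h1 : N - 1 ≤ 0
        · -- N = 1, right border = y ≤ 0: loop skipped
          rw [if_pos h1, hmin, pvBsLoop_base _ _ _ _ _ (by nlinarith)]
          omega
        · -- N ≥ 2: Pre_ gives 0 ≤ y, so y = 0, x ≥ 1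
          have hy' : y = 0 := by rcases hpre.1 with h | h <;> omega
          subst hy'
          rw [if_neg h1, hmin, pvBsLoop_base _ _ _ _ _ (by omega)]
          have hz : PySem.Int.floordiv (-((N - 1) * 0)) (x + 0) = 0 := by
            rw [show (-((N - 1) * 0) : Int) = 0 by ring]
            exact pvFdiv_zero (by omega)
          rw [hz]
          simp only [neg_zero, zero_mul, mul_zero, zero_sub, neg_mul, one_mul]
          rw [max_eq_right (by omega : -x ≤ 0)]
          simp
    · -- x ≤ 0
      by_cases h1 : N - 1 ≤ 0
      · rw [if_pos h1]
        have hb : ¬ (0:Int) < min x y * N := by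
          have h2 : min x y ≤ x := min_le_left _ _
          have hN1 : N = 1 := by omega
          rw [hN1, mul_one]; omega
        rw [pvBsLoop_base _ _ _ _ _ hb]; omega
      · -- N ≥ 2: Pre_ gives 0 ≤ x, so x = 0, y ≥ 1
        have hx0 : x = 0 := by rcases hpre.1 with h | h <;> omega
        have hy1 : 0 < y := by
          have := hpre.2
          rcases hpre.1 with h | h <;> omega
        subst hx0
        have hmin0 : min (0:Int) y = 0 := min_eq_left (by omega)
        rw [if_neg h1, hmin0, pvBsLoop_base _ _ _ _ _ (by omega)]
        have hi : -(PySem.Int.floordiv (-((N - 1) * y)) (0 + y)) = N - 1 := by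
          rw [show (0 + y : Int) = y by ring]
          exact (PySem.Int.neg_floordiv_neg_eq_iff_of_pos hy1).2 ⟨by nlinarith, by nlinarith⟩
        rw [hi]
        simp only [mul_zero, sub_self, zero_mul, max_self, add_zero, zero_add]
        omega
  · -- N ≤ 0: both return min x y
    have h1 : N - 1 ≤ 0 := by omega
    rw [if_pos h1]
    have hb : ¬ (0:Int) < min x y * N := by
      rcases hpre.1 with h | h
      · have hmin : 0 ≤ min x y := le_min h.1 h.2
        nlinarith
      · have hN0 : N = 0 := by omega
        rw [hN0, mul_zero]; omega
    rw [pvBsLoop_base _ _ _ _ _ hb]; omega
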